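-- pv_equiv track=rewrite | github.com/bsubercaseaux/BicliqueVA | partition_algs/cpp/density_aware.py | precompute_max_len_per_y
-- ===== SOURCE A (Python) =====
-- def choose_leq_threshold(L: int, y: int, T: int) -> bool:
--     """Return True iff C(L, y) <= T (y >= 0, L >= y). Uses fast incremental product."""
--     if y < 0 or y > L:
--         return y == 0  # C(L,0)=1 <= T for T>=1 in our calls
--     # small shortcuts
--     if y == 0 or y == L:
--         return 1 <= T
--     if y == 1 or y == L - 1:
--         return L <= T
--     # compute C(L, y) exactly but stop if exceeds T
--     y = min(y, L - y)
--     num = 1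
--     for i in range(1, y + 1):
--         num = (num * (L - y + i)) // i
--         if num > T:
--             return False
--     return num <= T
--
-- def precompute_max_len_per_y(r: int, T: int):
--     """
--     For each y in [1..r], compute X[y] = max L in [y..r] such that C(L,y) < T.
--     (We never use y=0 because empty S are ignored.)
--     """
--     X = [0] * (r + 1)
--     for y in range(1, r + 1):
--         # binary search on L in [y .. r]
--         lo, hi, ans = y, r, y - 1
--         while lo <= hi:
--             mid = (lo + hi) // 2
--             if choose_leq_threshold(mid, y, T - 1):  # strictly < T
--                 ans = mid
--                 lo = mid + 1
--             else:
--                 hi = mid - 1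
--         X[y] = ans
--     return X
-- ===== SOURCE B (Python) =====
-- def precompute_max_len_per_y(r: int, T: int):
--     """
--     For each y in [1..r], X[y] = max L in [y..r] with C(L,y) < T (default y-1).
--     Two-pointer sweep: with d(y) = max d >= 0 such that C(y+d, d) < T, d(y) is
--     non-increasing in y, so one pointer d walks down while y walks up, with
--     cur == C(y+d, d) maintained by exact incremental updates.
--     """
--     if r < 0:
--         return []
--     X = [0] * (r + 1)
--     if T <= 1:
--         for y in range(1, r + 1):
--             X[y] = y - 1
--         return X
--     d = r - 1            # largest extra length ever useful
--     cur = r              # C(1 + d, d); invariant: cur == C(y + d, d)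
--     for y in range(1, r + 1):
--         if y > 1:
--             cur = cur * (y + d) // y          # C(y-1+d, d) -> C(y+d, d)
--         while d > 0 and cur >= T:
--             cur = cur * d // (y + d)          # C(y+d, d) -> C(y+d-1, d-1)
--             d -= 1
--         X[y] = y + d if d <= r - y else r
--     return X
-- ===== Notes on version B (the rewrite author's own statement) =====
-- stated objective: faster
-- what changed: A runs, for each y, a binary search over L whose predicate recomputes C(L,y) from scratch by an early-exit incremental product; B makes one two-pointer sweep: d(y) = max d with C(y+d,d) < T is non-increasing in y, so a single pointer d walks down while y walks up, with cur = C(y+d,d) maintained by O(1) exact incremental updates.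
import Mathlib
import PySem

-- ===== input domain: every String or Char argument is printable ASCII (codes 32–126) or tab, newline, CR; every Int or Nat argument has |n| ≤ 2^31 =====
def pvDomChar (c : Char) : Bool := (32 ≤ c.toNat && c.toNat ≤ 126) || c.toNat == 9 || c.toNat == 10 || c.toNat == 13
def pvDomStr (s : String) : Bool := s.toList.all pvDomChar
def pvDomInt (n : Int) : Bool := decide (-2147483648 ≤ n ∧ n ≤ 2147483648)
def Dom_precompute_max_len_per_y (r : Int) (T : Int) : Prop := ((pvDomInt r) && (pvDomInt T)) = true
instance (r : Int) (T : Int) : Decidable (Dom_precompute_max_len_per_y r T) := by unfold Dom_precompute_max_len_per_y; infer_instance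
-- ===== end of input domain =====

-- B replaces A's per-y binary search (whose predicate recomputes C(L,y) from scratch)
-- by a single two-pointer sweep: d(y) = max d with C(y+d,d) < T is non-increasing in y,
-- and cur = C(y+d,d) is kept by exact incremental updates (objective: faster, as measured).

-- ===== PORT A =====
-- the for-loop of choose_leq_threshold (early `return False` becomes the `false` branch)
def chooseLoop (L y T : Int) : List Int → Int → Bool
  | [], num => decide (num ≤ T)
  | i :: rest, num =>
    let num' := PySem.Int.floordiv (num * (L - y + i)) i
    if T < num' then false else chooseLoop L y T rest num'

def choose_leq_threshold (L y T : Int) : Bool :=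
  if y < 0 ∨ L < y then decide (y = 0)
  else if y = 0 ∨ y = L then decide (1 ≤ T)
  else if y = 1 ∨ y = L - 1 then decide (L ≤ T)
  else
    let y2 := min y (L - y)
    chooseLoop L y2 T (PySem.List.pyRange 1 (y2 + 1) 1) 1

-- the while-loop of the binary search; the fuel argument only makes the loop
-- structurally total (it never runs out: lo..hi shrinks by at least 1 per step)
def bsearchFuel (y T : Int) : Nat → Int → Int → Int → Int
  | 0, _, _, ans => ans
  | fuel + 1, lo, hi, ans =>
    if lo ≤ hi then
      let mid := PySem.Int.floordiv (lo + hi) 2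
      if choose_leq_threshold mid y (T - 1) then bsearchFuel y T fuel (mid + 1) hi mid
      else bsearchFuel y T fuel lo (mid - 1) ans
    else ans

def bsearch (y T lo hi ans : Int) : Int := bsearchFuel y T (hi + 1 - lo).toNat lo hi ans

def precompute_max_len_per_y (r : Int) (T : Int) : List Int :=
  let X0 : List Int := List.replicate (r + 1).toNat 0
  (PySem.List.pyRange 1 (r + 1) 1).foldl
    (fun X y => PySem.List.pySetD X y (bsearch y T y r (y - 1))) X0

-- ===== PORT B =====
-- B's inner while loop; the fuel argument (= d.toNat at entry) only makes the
-- loop structurally total — d decreases by exactly 1 per iteration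
def whileDown (T y : Int) : Nat → Int → Int → Int × Int
  | 0, cur, d => (cur, d)
  | fuel + 1, cur, d =>
    if 0 < d ∧ T ≤ cur then
      whileDown T y fuel (PySem.Int.floordiv (cur * d) (y + d)) (d - 1)
    else (cur, d)

def precompute_max_len_per_y_alt (r : Int) (T : Int) : List Int :=
  if r < 0 then []
  else
    let X0 : List Int := List.replicate (r + 1).toNat 0
    if T ≤ 1 then
      (PySem.List.pyRange 1 (r + 1) 1).foldl (fun X y => PySem.List.pySetD X y (y - 1)) X0
    else
      ((PySem.List.pyRange 1 (r + 1) 1).foldl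
        (fun (s : (Int × Int) × List Int) (y : Int) =>
          let cur0 := if 1 < y then PySem.Int.floordiv (s.1.1 * (y + s.1.2)) y else s.1.1
          let cd := whileDown T y s.1.2.toNat cur0 s.1.2
          let X := PySem.List.pySetD s.2 y (if cd.2 ≤ r - y then y + cd.2 else r)
          (cd, X))
        ((r, r - 1), X0)).2

-- ===== PRECONDITION & SPEC =====
def Spec_precompute_max_len_per_y (r : Int) (T : Int) (out : List Int) : Prop := out = precompute_max_len_per_y_alt r T
instance (r : Int) (T : Int) (out : List Int) : Decidable (Spec_precompute_max_len_per_y r T out) := by unfold Spec_precompute_max_len_per_y; infer_instance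

-- ===== CLAIM (what is proved, stated in full; the proofs are below) =====
def Claim_equal_precompute_max_len_per_y : Prop := ∀ (r : Int) (T : Int), Dom_precompute_max_len_per_y r T → Spec_precompute_max_len_per_y r T (precompute_max_len_per_y r T)

-- ===== LEMMAS AND PROOFS =====

-- C(L, y) as an Int (via toNat)
def cInt (L y : Int) : Int := ((L.toNat.choose y.toNat : Nat) : Int)

-- the canonical "last qualifying L in [lo..hi]" scan both ports are reduced to
def scan (T y lo hi ans : Int) : Int :=
  (PySem.List.pyRange lo (hi + 1) 1).foldl (fun a L => if cInt L y < T then L else a) ans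

def canon (r T : Int) : List Int :=
  (PySem.List.pyRange 0 (r + 1) 1).map (fun j => if 1 ≤ j then scan T j j r (j - 1) else 0)

-- ---- binomial facts ----
theorem choose_diag_le (a k d : Nat) : (a + k).choose k ≤ (a + k + d).choose (k + d) := by
  induction d with
  | zero => simp
  | succ d ih =>
    have h : (a + k + d + 1).choose (k + d + 1) = (a + k + d).choose (k + d) + (a + k + d).choose (k + d + 1) :=
      Nat.choose_succ_succ _ _
    have : (a + k).choose k ≤ (a + k + d + 1).choose (k + d + 1) := by omega
    simpa [← Nat.add_assoc] using this

theorem cInt_mono (y : Int) {a b : Int} (h : a ≤ b) : cInt a y ≤ cInt b y := by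
  unfold cInt
  exact_mod_cast Nat.choose_le_choose y.toNat (by omega)

-- ---- the incremental product step computes the next binomial exactly ----
theorem chooseLoop_step (an j : Nat) :
    PySem.Int.floordiv ((((an + j).choose j : Nat) : Int) * ((an : Int) + ((j : Int) + 1))) ((j : Int) + 1)
      = (((an + (j + 1)).choose (j + 1) : Nat) : Int) := by
  have key : (an + j + 1) * (an + j).choose j = (an + j + 1).choose (j + 1) * (j + 1) :=
    Nat.add_one_mul_choose_eq (an + j) j
  have h1 : (((an + j).choose j : Nat) : Int) * ((an : Int) + ((j : Int) + 1))
      = (((an + (j + 1)).choose (j + 1) * (j + 1) : Nat) : Int) := by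
    push_cast
    have : ((an : Int) + j + 1) * ((an + j).choose j : Int)
        = ((an + j + 1).choose (j + 1) : Int) * ((j : Int) + 1) := by exact_mod_cast congrArg (Nat.cast : Nat → Int) key
    have e : an + (j + 1) = an + j + 1 := by omega
    rw [e]
    linarith [this]
  rw [h1]
  have h2 := PySem.Int.floordiv_natCast ((an + (j + 1)).choose (j + 1) * (j + 1)) (j + 1)
  have h3 : ((j : Nat) + 1 : Int) = (((j + 1 : Nat) : Nat) : Int) := by push_cast; ring
  rw [h3, h2]
  norm_num

-- ---- chooseLoop computes decide (C(an+yn, yn) ≤ t) ----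
theorem chooseLoop_spec (L y2 t : Int) (an yn : Nat)
    (ha : L - y2 = (an : Int)) (hy : y2 = (yn : Int)) :
    ∀ (d j : Nat), yn - j = d → j ≤ yn → (((an + j).choose j : Nat) : Int) ≤ t →
      chooseLoop L y2 t (PySem.List.pyRange ((j : Int) + 1) (y2 + 1) 1) (((an + j).choose j : Nat) : Int)
        = decide ((((an + yn).choose yn : Nat) : Int) ≤ t) := by
  intro d
  induction d with
  | zero =>
    intro j hd hj hnum
    have hjy : j = yn := by omega
    subst hjy
    rw [PySem.List.pyRange_one_eq_nil (by omega)]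
    simp [chooseLoop, hnum]
  | succ d ih =>
    intro j hd hj hnum
    have hjlt : j < yn := by omega
    rw [PySem.List.pyRange_one_cons (by omega)]
    show chooseLoop L y2 t _ _ = _
    rw [chooseLoop]
    have harg : L - y2 + ((j : Int) + 1) = (an : Int) + ((j : Int) + 1) := by omega
    rw [harg, chooseLoop_step an j]
    by_cases hbig : t < (((an + (j + 1)).choose (j + 1) : Nat) : Int)
    · simp only [hbig, if_true]
      have hle : (an + (j + 1)).choose (j + 1) ≤ (an + yn).choose yn := by
        have := choose_diag_le an (j + 1) (yn - (j + 1))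
        have e1 : an + (j + 1) + (yn - (j + 1)) = an + yn := by omega
        have e2 : (j + 1) + (yn - (j + 1)) = yn := by omega
        rwa [e1, e2] at this
      have : ¬ ((((an + yn).choose yn : Nat) : Int) ≤ t) := by
        have : ((((an + (j+1)).choose (j+1) : Nat)) : Int) ≤ (((an + yn).choose yn : Nat) : Int) := by
          exact_mod_cast hle
        omega
      simp [this]
    · simp only [hbig, if_false]
      have hcast : ((j : Int) + 1) + 1 = (((j + 1 : Nat) : Int)) + 1 := by push_cast; ring
      rw [hcast]
      exact ih (j + 1) (by omega) (by omega) (by omega)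

-- ---- choose_leq_threshold decides cInt L y ≤ t on the binary-search domain ----
theorem choose_correct (L y t : Int) (h1 : 1 ≤ y) (h2 : y ≤ L) :
    choose_leq_threshold L y t = decide (cInt L y ≤ t) := by
  unfold choose_leq_threshold
  rw [if_neg (by omega)]
  by_cases hyl : y = L
  · subst hyl
    rw [if_pos (Or.inr rfl)]
    have : cInt y y = 1 := by unfold cInt; simp
    simp [this]
  · rw [if_neg (by omega)]
    by_cases hsmall : y = 1 ∨ y = L - 1
    · rw [if_pos hsmall]
      have hL1 : 1 ≤ L := by omega
      have : cInt L y = L := by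
        unfold cInt
        rcases hsmall with h | h
        · subst h
          simp [Nat.choose_one_right]
          omega
        · have hyy : y.toNat = L.toNat - 1 := by omega
          rw [hyy]
          have h1n : 1 ≤ L.toNat := by omega
          rw [Nat.choose_symm (by omega), Nat.choose_one_right]
          omega
      simp [this]
    · rw [if_neg hsmall]
      have hy2 : 2 ≤ y := by omega
      have hL2 : y ≤ L - 2 := by omega
      set y2 : Int := min y (L - y) with hy2def
      have hy2ge : 2 ≤ y2 := by omega
      have hy2le : y2 ≤ L - y2 := by omega
      set yn : Nat := y2.toNat with hyn
      set an : Nat := (L - y2).toNat with han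
      have hyv : y2 = (yn : Int) := by omega
      have hav : L - y2 = (an : Int) := by omega
      have hcc : cInt L y = (((an + yn).choose yn : Nat) : Int) := by
        unfold cInt
        have hsum : L.toNat = an + yn := by omega
        rw [hsum]
        by_cases hc : y ≤ L - y
        · have hy' : y.toNat = yn := by omega
          rw [hy']
        · have han2 : y.toNat = an := by omega
          have hsymm := Nat.choose_symm (n := an + yn) (k := an) (by omega)
          have hsub : an + yn - an = yn := by omega
          rw [hsub] at hsymm
          rw [han2, ← hsymm]
      by_cases ht : t < 1
      · -- the very first loop step already exceeds t; C(L,y) ≥ 1 > t as well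
        show chooseLoop L y2 t (PySem.List.pyRange 1 (y2 + 1) 1) 1 = decide (cInt L y ≤ t)
        rw [PySem.List.pyRange_one_cons (by omega)]
        rw [chooseLoop]
        have harg : 1 * (L - y2 + 1) = ((an : Int) + 1) := by omega
        have hfd : PySem.Int.floordiv (1 * (L - y2 + 1)) 1 = (an : Int) + 1 := by
          rw [harg, PySem.Int.floordiv_eq_ediv_of_pos (by omega)]
          simp
        rw [hfd]
        have hbig : t < (an : Int) + 1 := by omega
        rw [if_pos hbig]
        have hpos : 0 < (an + yn).choose yn := Nat.choose_pos (by omega)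
        have : ¬ (cInt L y ≤ t) := by
          rw [hcc]
          have : (1 : Int) ≤ (((an + yn).choose yn : Nat) : Int) := by exact_mod_cast hpos
          omega
        simp [this]
      · show chooseLoop L y2 t (PySem.List.pyRange 1 (y2 + 1) 1) 1 = decide (cInt L y ≤ t)
        have h0 : (((an + 0).choose 0 : Nat) : Int) = 1 := by simp
        have := chooseLoop_spec L y2 t an yn hav hyv yn 0 (by omega) (by omega) (by rw [h0]; omega)
        rw [h0] at this
        have hstart : ((0 : Nat) : Int) + 1 = (1 : Int) := by norm_num
        rw [hstart] at this
        rw [this, hcc]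

-- ---- scan helpers ----
theorem scan_foldl_noop (T y : Int) :
    ∀ (l : List Int) (ans : Int), (∀ L ∈ l, ¬ (cInt L y < T)) →
      l.foldl (fun a L => if cInt L y < T then L else a) ans = ans := by
  intro l
  induction l with
  | nil => intro ans _; rfl
  | cons x xs ih =>
    intro ans h
    simp only [List.foldl_cons]
    rw [if_neg (h x (by simp))]
    exact ih ans (fun L hL => h L (by simp [hL]))

theorem scan_foldl_last (T y lo mid : Int) (h : lo ≤ mid) (hq : cInt mid y < T) :
    ∀ (ans : Int), (PySem.List.pyRange lo (mid + 1) 1).foldl (fun a L => if cInt L y < T then L else a) ans = mid := by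
  intro ans
  rw [PySem.List.pyRange_one_succ_right h, List.foldl_append]
  simp [hq]

-- ---- the binary search equals the linear scan ----
theorem bsearchFuel_eq_scan (y T : Int) (hy : 1 ≤ y) :
    ∀ (n : Nat) (lo hi ans : Int), (hi + 1 - lo).toNat ≤ n → y ≤ lo →
      bsearchFuel y T n lo hi ans = scan T y lo hi ans := by
  intro n
  induction n with
  | zero =>
    intro lo hi ans hn hlo
    unfold scan
    rw [PySem.List.pyRange_one_eq_nil (by omega)]
    rfl
  | succ n ih =>
    intro lo hi ans hn hlo
    by_cases hle : lo ≤ hi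
    · rw [bsearchFuel, if_pos hle]
      have hmid := PySem.Int.floordiv_two_mid_bounds hle
      set mid : Int := PySem.Int.floordiv (lo + hi) 2 with hmiddef
      have hc := choose_correct mid y (T - 1) hy (by omega)
      by_cases hq : cInt mid y < T
      · have : choose_leq_threshold mid y (T - 1) = true := by rw [hc]; simp; omega
        simp only [this, if_true]
        rw [ih (mid + 1) hi mid (by omega) (by omega)]
        unfold scan
        rw [PySem.List.pyRange_one_append lo (mid + 1) (hi + 1) (by omega) (by omega), List.foldl_append]
        rw [scan_foldl_last T y lo mid (by omega) hq]
      · have : choose_leq_threshold mid y (T - 1) = false := by rw [hc]; simp; omega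
        simp only [this, Bool.false_eq_true, if_false]
        rw [ih lo (mid - 1) ans (by omega) (by omega)]
        unfold scan
        rw [PySem.List.pyRange_one_append lo mid (hi + 1) (by omega) (by omega), List.foldl_append]
        have e : mid - 1 + 1 = mid := by omega
        rw [e]
        have hnoop : ∀ L ∈ PySem.List.pyRange mid (hi + 1) 1, ¬ (cInt L y < T) := by
          intro L hL
          rw [PySem.List.mem_pyRange_one] at hL
          have := cInt_mono y (a := mid) (b := L) (by omega)
          omega
        rw [scan_foldl_noop T y _ _ hnoop]
    · rw [bsearchFuel, if_neg hle]
      unfold scan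
      rw [PySem.List.pyRange_one_eq_nil (by omega)]
      rfl

theorem bsearch_eq_scan (y T : Int) (hy : 1 ≤ y) (lo hi ans : Int) (hlo : y ≤ lo) :
    bsearch y T lo hi ans = scan T y lo hi ans :=
  bsearchFuel_eq_scan y T hy _ lo hi ans (by omega) hlo

-- ---- foldl of in-range index writes, characterised by getElem? ----
theorem foldl_pySetD_getElem? (f : Int → Int) :
    ∀ (ys : List Int) (X : List Int) (j : Nat),
      (∀ y ∈ ys, 0 ≤ y ∧ y < (X.length : Int)) →
      (List.foldl (fun X y => PySem.List.pySetD X y (f y)) X ys)[j]? =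
        if (j : Int) ∈ ys then some (f j) else X[j]? := by
  intro ys
  induction ys with
  | nil => intro X j _; simp
  | cons y ys ih =>
    intro X j hys
    have hy := hys y (by simp)
    simp only [List.foldl_cons]
    rw [PySem.List.pySetD_of_nonneg X _ hy.1]
    have hlen : (X.set y.toNat (f y)).length = X.length := by simp
    rw [ih (X.set y.toNat (f y)) j (by intro y' hy'; rw [hlen]; exact hys y' (by simp [hy']))]
    by_cases hmem : (j : Int) ∈ ys
    · simp [hmem]
    · rw [if_neg hmem]
      by_cases hjy : (j : Int) = y
      · rw [if_pos (by simp [hjy])]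
        have hjn : y.toNat = j := by omega
        rw [hjn, List.getElem?_set_self (by omega), ← hjy]
      · rw [if_neg (by simp [hmem]; omega)]
        exact List.getElem?_set_ne (by omega)

-- ---- port A equals canon ----
theorem portA_eq_canon (r T : Int) : precompute_max_len_per_y r T = canon r T := by
  unfold precompute_max_len_per_y canon
  apply List.ext_getElem?
  intro j
  rw [foldl_pySetD_getElem? _ _ _ j ?hr]
  case hr =>
    intro y hy
    rw [PySem.List.mem_pyRange_one] at hy
    constructor
    · omega
    · simp only [List.length_replicate]
      omega
  by_cases hmem : (j : Int) ∈ PySem.List.pyRange 1 (r + 1) 1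
  · rw [if_pos hmem]
    rw [PySem.List.mem_pyRange_one] at hmem
    have hjlt : j < (r + 1 - 0).toNat := by omega
    rw [List.getElem?_map, PySem.List.getElem?_pyRange_one]
    rw [if_pos (by simpa using hjlt)]
    have e0 : (0 : Int) + (j : Int) = (j : Int) := by omega
    simp only [Option.map_some, e0]
    rw [if_pos (by omega)]
    rw [bsearch_eq_scan (j : Int) T (by omega) (j : Int) r ((j : Int) - 1) (by omega)]
  · rw [if_neg hmem]
    rw [PySem.List.mem_pyRange_one] at hmem
    rw [List.getElem?_map, PySem.List.getElem?_pyRange_one]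
    by_cases hin : j < (r + 1).toNat
    · rw [List.getElem?_replicate, if_pos hin]
      rw [if_pos (show j < (r + 1 - 0).toNat by omega)]
      have hj0 : (j : Int) = 0 := by omega
      simp only [Option.map_some]
      rw [if_neg (by omega)]
    · rw [List.getElem?_replicate, if_neg hin]
      rw [if_neg (show ¬ (j < (r + 1 - 0).toNat) by omega)]
      rfl


-- ---- B side: the two-pointer sweep ----

def stepTP (r T : Int) (s : (Int × Int) × List Int) (y : Int) : (Int × Int) × List Int :=
  let cur0 := if 1 < y then PySem.Int.floordiv (s.1.1 * (y + s.1.2)) y else s.1.1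
  let cd := whileDown T y s.1.2.toNat cur0 s.1.2
  let X := PySem.List.pySetD s.2 y (if cd.2 ≤ r - y then y + cd.2 else r)
  (cd, X)

theorem portB_unfold (r T : Int) : precompute_max_len_per_y_alt r T =
    if r < 0 then []
    else if T ≤ 1 then
      (PySem.List.pyRange 1 (r + 1) 1).foldl
        (fun X y => PySem.List.pySetD X y (y - 1)) (List.replicate (r + 1).toNat 0)
    else
      ((PySem.List.pyRange 1 (r + 1) 1).foldl (stepTP r T)
        ((r, r - 1), List.replicate (r + 1).toNat 0)).2 := rfl

-- symmetric binomial: C(L, y) = C(L, L-y)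
theorem cInt_symm (L y : Int) (h0 : 0 ≤ y) (h1 : y ≤ L) : cInt L y = cInt L (L - y) := by
  unfold cInt
  have e : (L - y).toNat = L.toNat - y.toNat := by omega
  rw [e, Nat.choose_symm (by omega)]

theorem cInt_pos (L y : Int) (h0 : 0 ≤ y) (h1 : y ≤ L) : 1 ≤ cInt L y := by
  unfold cInt
  exact_mod_cast Nat.choose_pos (by omega)

theorem cInt_zero (L : Int) : cInt L 0 = 1 := by
  unfold cInt
  simp

-- diagonal monotonicity in Int form: e ≤ d → C(y+e, e) ≤ C(y+d, d)
theorem cInt_diag_le (y e d : Int) (hy : 0 ≤ y) (he : 0 ≤ e) (hed : e ≤ d) :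
    cInt (y + e) e ≤ cInt (y + d) d := by
  unfold cInt
  have h := choose_diag_le y.toNat e.toNat (d.toNat - e.toNat)
  have e1 : y.toNat + e.toNat + (d.toNat - e.toNat) = (y + d).toNat := by omega
  have e2 : e.toNat + (d.toNat - e.toNat) = d.toNat := by omega
  have e3 : y.toNat + e.toNat = (y + e).toNat := by omega
  rw [e1] at h
  rw [e2] at h
  rw [e3] at h
  exact_mod_cast h

-- the d-step is an exact division: C(y+d, d) * d // (y+d) = C(y+d-1, d-1)
theorem d_step (y d : Int) (hy : 1 ≤ y) (hd : 1 ≤ d) :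
    PySem.Int.floordiv (cInt (y + d) d * d) (y + d) = cInt (y + d - 1) (d - 1) := by
  have key : (y + d).toNat * ((y + d).toNat - 1).choose (d.toNat - 1)
      = (y + d).toNat.choose d.toNat * d.toNat := by
    have h := Nat.add_one_mul_choose_eq ((y + d).toNat - 1) (d.toNat - 1)
    have e1 : (y + d).toNat - 1 + 1 = (y + d).toNat := by omega
    have e2 : d.toNat - 1 + 1 = d.toNat := by omega
    rw [e1, e2] at h
    exact h
  have hmul : cInt (y + d) d * d
      = ((((y + d).toNat * (((y + d).toNat - 1).choose (d.toNat - 1))) : Nat) : Int) := by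
    unfold cInt
    rw [key]
    push_cast
    have hdc : (d.toNat : Int) = d := by omega
    rw [hdc]
  rw [hmul]
  have hfd := PySem.Int.floordiv_natCast
    ((y + d).toNat * (((y + d).toNat - 1).choose (d.toNat - 1))) ((y + d).toNat)
  rw [show (((y + d).toNat : Nat) : Int) = y + d by omega] at hfd
  rw [hfd, Nat.mul_div_cancel_left _ (show 0 < (y + d).toNat by omega)]
  unfold cInt
  have e3 : (y + d - 1).toNat = (y + d).toNat - 1 := by omega
  have e4 : (d - 1).toNat = d.toNat - 1 := by omega
  rw [e3, e4]

-- the y-step is an exact division: C(y-1+d, d) * (y+d) // y = C(y+d, d)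
theorem y_step (y d : Int) (hy : 1 ≤ y) (hd : 0 ≤ d) :
    PySem.Int.floordiv (cInt (y - 1 + d) d * (y + d)) y = cInt (y + d) d := by
  have key : (y - 1 + d).toNat.choose d.toNat * ((y - 1 + d).toNat + 1)
      = ((y - 1 + d).toNat + 1).choose d.toNat * ((y - 1 + d).toNat + 1 - d.toNat) :=
    Nat.choose_mul_succ_eq (y - 1 + d).toNat d.toNat
  have e1 : (y - 1 + d).toNat + 1 = (y + d).toNat := by omega
  have e2 : (y + d).toNat - d.toNat = y.toNat := by omega
  rw [e1, e2] at key
  have hmul : cInt (y - 1 + d) d * (y + d)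
      = ((((y + d).toNat.choose d.toNat * y.toNat) : Nat) : Int) := by
    unfold cInt
    rw [← key]
    push_cast
    have hydc : ((y + d).toNat : Int) = y + d := by omega
    rw [hydc]
  rw [hmul]
  have hfd := PySem.Int.floordiv_natCast ((y + d).toNat.choose d.toNat * y.toNat) y.toNat
  rw [show ((y.toNat : Nat) : Int) = y by omega] at hfd
  rw [hfd, Nat.mul_div_cancel _ (show 0 < y.toNat by omega)]
  rfl

-- result of the while loop: the largest e ≤ d with C(y+e,e) < T (or e = 0)
theorem whileDown_spec (T y : Int) (hy : 1 ≤ y) :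
    ∀ (fuel : Nat) (cur d : Int), d = (fuel : Int) → cur = cInt (y + d) d →
      ∃ d' : Int, whileDown T y fuel cur d = (cInt (y + d') d', d') ∧
        0 ≤ d' ∧ d' ≤ d ∧ (cInt (y + d') d' < T ∨ d' = 0) ∧
        (∀ e, d' < e → e ≤ d → T ≤ cInt (y + e) e) := by
  intro fuel
  induction fuel with
  | zero =>
    intro cur d hd hcur
    exact ⟨d, by rw [whileDown, hcur], by omega, by omega, Or.inr (by omega), by omega⟩
  | succ fuel ih =>
    intro cur d hd hcur
    rw [whileDown]
    by_cases hc : 0 < d ∧ T ≤ cur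
    · rw [if_pos hc]
      have hstep : PySem.Int.floordiv (cur * d) (y + d) = cInt (y + d - 1) (d - 1) := by
        rw [hcur]; exact d_step y d hy (by omega)
      rw [hstep]
      obtain ⟨d', h1, h2, h3, h4, h5⟩ := ih (cInt (y + d - 1) (d - 1)) (d - 1) (by omega)
        (by rw [show y + d - 1 = y + (d - 1) by ring])
      refine ⟨d', by rw [h1], h2, by omega, h4, ?_⟩
      intro e he1 he2
      by_cases hetop : e = d
      · subst hetop
        rw [← hcur]
        exact hc.2
      · exact h5 e he1 (by omega)
    · rw [if_neg hc]
      push_neg at hc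
      refine ⟨d, by rw [hcur], by omega, le_refl d, ?_, by omega⟩
      by_cases hd0 : 0 < d
      · exact Or.inl (by rw [← hcur]; exact hc hd0)
      · exact Or.inr (by omega)

-- outer-loop invariant after processing y = m
def InvTP (r T : Int) (m : Nat) (cur d : Int) : Prop :=
  0 ≤ d ∧ d ≤ r - 1 ∧ cur = cInt ((m : Int) + d) d ∧ cInt ((m : Int) + d) d < T ∧
    (∀ e, d < e → e ≤ r - 1 → T ≤ cInt ((m : Int) + e) e)

-- the recorded entry equals the canonical scan value
theorem entry_eq_scan (r T : Int) (mN : Nat) (cur d : Int) (hT : 2 ≤ T) (hm : 1 ≤ mN)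
    (hmr : (mN : Int) ≤ r) (hinv : InvTP r T mN cur d) :
    (if d ≤ r - (mN : Int) then (mN : Int) + d else r) = scan T (mN : Int) (mN : Int) r ((mN : Int) - 1) := by
  obtain ⟨hd0, hdr, _, hlt, hfail⟩ := hinv
  set m : Int := (mN : Int) with hmdef
  have hm1 : 1 ≤ m := by omega
  set M : Int := if d ≤ r - m then m + d else r with hM
  have hMb : m ≤ M ∧ M ≤ r ∧ M - m ≤ d := by
    rw [hM]; split_ifs <;> omega
  have hqual : cInt M m < T := by
    have h1 : cInt (m + (M - m)) (M - m) ≤ cInt (m + d) d :=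
      cInt_diag_le m (M - m) d (by omega) (by omega) (by omega)
    have h2 : cInt M m = cInt M (M - m) := cInt_symm M m (by omega) (by omega)
    have e : m + (M - m) = M := by ring
    rw [e] at h1
    rw [h2]
    omega
  unfold scan
  rw [PySem.List.pyRange_one_append m (M + 1) (r + 1) (by omega) (by omega), List.foldl_append]
  rw [scan_foldl_last T m m M (by omega) hqual]
  refine (scan_foldl_noop T m _ M ?_).symm
  intro L hL
  rw [PySem.List.mem_pyRange_one] at hL
  have hfar : d < L - m := by
    rw [hM] at hL hMb
    by_cases hc : d ≤ r - m
    · rw [if_pos hc] at hL; omega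
    · rw [if_neg hc] at hL; omega
  have h1 : T ≤ cInt (m + (L - m)) (L - m) := hfail (L - m) hfar (by omega)
  have h2 : cInt L m = cInt L (L - m) := cInt_symm L m (by omega) (by omega)
  have e : m + (L - m) = L := by ring
  rw [e] at h1
  omega

-- the main fold, characterised: invariant state + X entries written so far
theorem B_loop (r T : Int) (hr : 1 ≤ r) (hT : 2 ≤ T) :
    ∀ (m : Nat), 1 ≤ m → (m : Int) ≤ r →
      ∃ cur d X,
        (PySem.List.pyRange 1 ((m : Int) + 1) 1).foldl (stepTP r T)
          ((r, r - 1), List.replicate (r + 1).toNat 0) = ((cur, d), X) ∧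
        InvTP r T m cur d ∧ X.length = (r + 1).toNat ∧
        (∀ j : Nat, X[j]? = if 1 ≤ (j : Int) ∧ (j : Int) ≤ (m : Int)
          then some (scan T (j : Int) (j : Int) r ((j : Int) - 1))
          else (List.replicate (r + 1).toNat (0 : Int))[j]?) := by
  intro m
  induction m with
  | zero => intro h0; omega
  | succ m ih =>
    intro _ hmr
    by_cases hm0 : m = 0
    · -- first iteration, y = 1 (no y-step)
      subst hm0
      rw [show (((0 + 1 : Nat) : Int) + 1) = 1 + 1 by norm_num]
      rw [show PySem.List.pyRange 1 (1 + 1) 1 = [1] from PySem.List.pyRange_one_singleton 1]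
      simp only [List.foldl_cons, List.foldl_nil, stepTP]
      rw [if_neg (by omega)]
      have hcur0 : (r : Int) = cInt (1 + (r - 1)) (r - 1) := by
        have e : 1 + (r - 1) = r := by ring
        rw [e, cInt_symm r (r - 1) (by omega) (by omega)]
        have e2 : r - (r - 1) = 1 := by ring
        rw [e2]
        unfold cInt
        rw [show (1 : Int).toNat = 1 from rfl, Nat.choose_one_right]
        omega
      obtain ⟨d', hrun, hd'0, hd'le, hq, hfail⟩ :=
        whileDown_spec T 1 (by omega) (r - 1).toNat r (r - 1) (by omega) hcur0
      have hinv1 : InvTP r T 1 (cInt (1 + d') d') d' := by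
        refine ⟨hd'0, by omega, by norm_num, ?_, ?_⟩
        · rcases hq with h | h
          · simpa using h
          · subst h
            have h1 := cInt_zero (((1 : Nat) : Int) + 0)
            simp only [Nat.cast_one] at h1 ⊢
            omega
        · intro e he1 he2
          simpa using hfail e he1 (by omega)
      rw [hrun]
      refine ⟨cInt (1 + d') d', d', _, rfl, hinv1, ?_, ?_⟩
      · rw [PySem.List.pySetD_of_nonneg _ _ (by omega)]
        simp
      · intro j
        rw [PySem.List.pySetD_of_nonneg _ _ (by omega)]
        have hred : ((cInt (1 + d') d', d') : Int × Int).2 = d' := rfl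
        rw [hred, show (1 : Int).toNat = 1 from rfl]
        by_cases hj : 1 ≤ (j : Int) ∧ (j : Int) ≤ ((1 : Nat) : Int)
        · have hj1 : j = 1 := by
            have := hj.1; have := hj.2
            omega
          subst hj1
          rw [if_pos hj]
          rw [List.getElem?_set_self (by simp; omega)]
          have hent := entry_eq_scan r T 1 (cInt (1 + d') d') d' hT (by omega) (by omega) hinv1
          simp only [Nat.cast_one] at hent ⊢
          rw [hent]
        · rw [if_neg hj]
          rw [List.getElem?_set_ne (by omega)]
    · -- subsequent iteration, y = m + 1 ≥ 2
      have hm1 : 1 ≤ m := by omega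
      obtain ⟨cur, d, X, hfold, hinv, hlenX, hX⟩ := ih hm1 (by omega)
      obtain ⟨hd0, hdr, hcur, hlt, hfail⟩ := hinv
      rw [show (((m + 1 : Nat) : Int) + 1) = ((m : Int) + 1) + 1 by push_cast; ring]
      have hsnoc : PySem.List.pyRange 1 (((m : Int) + 1) + 1) 1
          = PySem.List.pyRange 1 ((m : Int) + 1) 1 ++ [(m : Int) + 1] :=
        PySem.List.pyRange_one_succ_right (by omega)
      rw [hsnoc, List.foldl_append, hfold]
      simp only [List.foldl_cons, List.foldl_nil, stepTP]
      rw [if_pos (by omega)]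
      have hystep : PySem.Int.floordiv (cur * (((m : Int) + 1) + d)) ((m : Int) + 1)
          = cInt (((m : Int) + 1) + d) d := by
        rw [hcur]
        have e : (m : Int) + d = ((m : Int) + 1) - 1 + d := by ring
        rw [e]
        exact y_step ((m : Int) + 1) d (by omega) hd0
      rw [hystep]
      obtain ⟨d', hrun, hd'0, hd'le, hq, hfail'⟩ :=
        whileDown_spec T ((m : Int) + 1) (by omega) d.toNat (cInt (((m : Int) + 1) + d) d) d
          (by omega) rfl
      have hinv' : InvTP r T (m + 1) (cInt (((m : Int) + 1) + d') d') d' := by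
        refine ⟨hd'0, by omega, by push_cast; ring_nf, ?_, ?_⟩
        · have ecast : ((m + 1 : Nat) : Int) + d' = ((m : Int) + 1) + d' := by push_cast; ring
          rw [ecast]
          rcases hq with h | h
          · exact h
          · subst h
            have h1 := cInt_zero (((m : Int) + 1) + 0)
            omega
        · intro e he1 he2
          have ecast : ((m + 1 : Nat) : Int) + e = ((m : Int) + 1) + e := by push_cast; ring
          rw [ecast]
          by_cases helow : e ≤ d
          · exact hfail' e he1 helow
          · have h1 : T ≤ cInt ((m : Int) + e) e := hfail e (by omega) he2
            have h2 : cInt ((m : Int) + e) e ≤ cInt (((m : Int) + 1) + e) e :=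
              cInt_mono e (by omega)
            omega
      rw [hrun]
      refine ⟨cInt (((m : Int) + 1) + d') d', d', _, rfl, hinv', ?_, ?_⟩
      · rw [PySem.List.pySetD_of_nonneg _ _ (by omega)]
        simp [hlenX]
      · intro j
        rw [PySem.List.pySetD_of_nonneg _ _ (by omega)]
        have hred : ((cInt (((m : Int) + 1) + d') d', d') : Int × Int).2 = d' := rfl
        rw [hred]
        by_cases hnew : (j : Int) = (m : Int) + 1
        · have hent := entry_eq_scan r T (m + 1) (cInt (((m : Int) + 1) + d') d') d' hT
            (by omega) (by push_cast; omega) hinv'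
          have ecast1 : ((m + 1 : Nat) : Int) = (m : Int) + 1 := by push_cast; ring
          rw [ecast1] at hent
          rw [hent]
          have hjn : ((m : Int) + 1).toNat = j := by omega
          rw [hjn]
          rw [List.getElem?_set_self (by rw [hlenX]; omega)]
          rw [if_pos (show 1 ≤ (j : Int) ∧ (j : Int) ≤ ((m + 1 : Nat) : Int) from by push_cast; omega)]
          rw [← hnew]
        · have hne : ((m : Int) + 1).toNat ≠ j := by omega
          rw [List.getElem?_set_ne hne, hX j]
          by_cases hold : 1 ≤ (j : Int) ∧ (j : Int) ≤ (m : Int)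
          · rw [if_pos hold, if_pos (by push_cast; omega)]
          · rw [if_neg hold, if_neg (by push_cast; omega)]

-- ---- port B equals canon ----
theorem portB_eq_canon (r T : Int) : precompute_max_len_per_y_alt r T = canon r T := by
  rw [portB_unfold]
  by_cases hr : r < 0
  · rw [if_pos hr]
    unfold canon
    rw [PySem.List.pyRange_one_eq_nil (by omega)]
    rfl
  · rw [if_neg hr]
    by_cases hT : T ≤ 1
    · -- nothing ever qualifies: every entry is y - 1
      rw [if_pos hT]
      unfold canon
      apply List.ext_getElem?
      intro j
      rw [foldl_pySetD_getElem? (fun y => y - 1) _ _ j ?hr2]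
      case hr2 =>
        intro y hy
        rw [PySem.List.mem_pyRange_one] at hy
        simp only [List.length_replicate]
        omega
      have hscan : ∀ jj : Int, 1 ≤ jj → jj ≤ r → scan T jj jj r (jj - 1) = jj - 1 := by
        intro jj h1 h2
        unfold scan
        apply scan_foldl_noop
        intro L hL
        rw [PySem.List.mem_pyRange_one] at hL
        have := cInt_pos L jj (by omega) (by omega)
        omega
      by_cases hmem : (j : Int) ∈ PySem.List.pyRange 1 (r + 1) 1
      · rw [if_pos hmem]
        rw [PySem.List.mem_pyRange_one] at hmem
        rw [List.getElem?_map, PySem.List.getElem?_pyRange_one]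
        rw [if_pos (show j < (r + 1 - 0).toNat by omega)]
        simp only [Option.map_some]
        rw [if_pos (by omega)]
        rw [hscan (0 + (j : Int)) (by omega) (by omega)]
        norm_num
      · rw [if_neg hmem]
        rw [PySem.List.mem_pyRange_one] at hmem
        rw [List.getElem?_map, PySem.List.getElem?_pyRange_one]
        by_cases hin : j < (r + 1).toNat
        · rw [List.getElem?_replicate, if_pos hin]
          rw [if_pos (show j < (r + 1 - 0).toNat by omega)]
          simp only [Option.map_some]
          rw [if_neg (by omega)]
        · rw [List.getElem?_replicate, if_neg hin]
          rw [if_neg (show ¬ (j < (r + 1 - 0).toNat) by omega)]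
          rfl
    · rw [if_neg hT]
      by_cases hr0 : r = 0
      · subst hr0
        rw [PySem.List.pyRange_one_eq_nil (by norm_num)]
        unfold canon
        rw [show (0 : Int) + 1 = 1 by norm_num,
          show PySem.List.pyRange 0 1 1 = [0] from PySem.List.pyRange_one_singleton 0]
        simp
      · -- r ≥ 1 and T ≥ 2: the two-pointer invariant at m = r
        obtain ⟨cur, d, X, hfold, _, hlenX, hX⟩ :=
          B_loop r T (by omega) (by omega) r.toNat (by omega) (by omega)
        rw [show ((r.toNat : Int) + 1) = r + 1 by omega] at hfold
        rw [hfold]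
        unfold canon
        apply List.ext_getElem?
        intro j
        rw [hX j]
        rw [List.getElem?_map, PySem.List.getElem?_pyRange_one]
        by_cases hjr : 1 ≤ (j : Int) ∧ (j : Int) ≤ ((r.toNat : Nat) : Int)
        · rw [if_pos hjr]
          rw [if_pos (show j < (r + 1 - 0).toNat by omega)]
          simp only [Option.map_some]
          rw [if_pos (by omega)]
          norm_num
        · rw [if_neg hjr]
          by_cases hin : j < (r + 1).toNat
          · rw [List.getElem?_replicate, if_pos hin]
            rw [if_pos (show j < (r + 1 - 0).toNat by omega)]
            simp only [Option.map_some]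
            rw [if_neg (by omega)]
          · rw [List.getElem?_replicate, if_neg hin]
            rw [if_neg (show ¬ (j < (r + 1 - 0).toNat) by omega)]
            rfl

-- ===== VERDICT (by name: the statement is the Claim_ definition above) =====
theorem precompute_max_len_per_y_spec : Claim_equal_precompute_max_len_per_y := by
  intro r T _
  unfold Spec_precompute_max_len_per_y
  rw [portA_eq_canon, portB_eq_canon]
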